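-- pv_equiv track=rewrite | github.com/julianazacharias/code-signal-courses | fundamental-interview-preparation-with-python/05-practice-for-interviews/02-strings-frequency-calculation.py | character_frequency_encoding
-- ===== SOURCE A (Python) =====
-- def character_frequency_encoding(word):
--     next_string = ''
--
--     for letter in word:
--         next_string += 'a' if letter == 'z' else chr(ord(letter) + 1)
--     frequency_dict = {}
--
--     for letter in next_string:
--         if letter in frequency_dict:
--             frequency_dict[letter] += 1
--         else:
--             frequency_dict[letter] = 1
--     combined_values = []
--
--     for letter, freq in frequency_dict.items():
--         combined_values.append(ord(letter) * freq)
--     combined_values.sort(reverse=True)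
--     return combined_values
-- ===== SOURCE B (Python) =====
-- def character_frequency_encoding(word):
--     shifted = sorted('a' if letter == 'z' else chr(ord(letter) + 1) for letter in word)
--     products = []
--     i = 0
--     n = len(shifted)
--     while i < n:
--         j = i + 1
--         while j < n and shifted[j] == shifted[i]:
--             j += 1
--         products.append(ord(shifted[i]) * (j - i))
--         i = j
--     products.sort(reverse=True)
--     return products
-- ===== Notes on version B (the rewrite author's own statement) =====
-- stated objective: alternative
-- what changed: B counts frequencies by sorting the shifted characters and run-length scanning consecutive equal runs (no dictionary), then sorts the ord*runlength products descending, where A builds a frequency dict and reads it back.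
import Mathlib
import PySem

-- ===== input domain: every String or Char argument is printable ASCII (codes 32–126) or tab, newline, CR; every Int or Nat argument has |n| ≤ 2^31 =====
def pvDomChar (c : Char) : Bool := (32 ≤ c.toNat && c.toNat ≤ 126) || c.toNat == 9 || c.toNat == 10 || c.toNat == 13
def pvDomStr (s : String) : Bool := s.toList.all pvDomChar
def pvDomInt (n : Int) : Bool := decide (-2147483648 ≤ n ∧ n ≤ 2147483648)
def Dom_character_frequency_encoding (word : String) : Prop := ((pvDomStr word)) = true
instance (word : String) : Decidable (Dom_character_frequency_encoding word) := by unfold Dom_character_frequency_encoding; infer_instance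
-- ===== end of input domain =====

-- B replaces A's frequency dictionary by sorting the shifted characters and run-length scanning
-- consecutive equal runs; an alternative decomposition of the same task, not claimed faster.

-- ===== PORT A =====
-- shift of one letter: 'a' if letter == 'z' else chr(ord(letter) + 1)
def pvShift (letter : Char) : Char :=
  if letter = 'z' then 'a' else Char.ofNat (letter.toNat + 1)

def character_frequency_encoding (word : String) : List Int :=
  -- next_string built by += over word
  let next_string : List Char :=
    word.toList.foldl (fun acc letter => acc ++ [pvShift letter]) []
  -- frequency_dict: if letter in dict then dict[letter] += 1 else dict[letter] = 1
  let frequency_dict : PySem.Dict Char Int :=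
    next_string.foldl
      (fun d letter =>
        if d.contains letter then d.insert letter (d.getD letter 0 + 1)
        else d.insert letter 1)
      PySem.Dict.empty
  -- combined_values: append ord(letter) * freq over dict.items()
  let combined_values : List Int :=
    frequency_dict.items.foldl (fun acc p => acc ++ [(p.1.toNat : Int) * p.2]) []
  PySem.List.sorted combined_values (fun x => x) true

-- ===== PORT B =====
-- the inner while loop: one run of equal chars at the front, then continue after it
def pvRuns : List Char → List (Char × Nat)
  | [] => []
  | c :: cs =>
      (c, (cs.takeWhile (· == c)).length + 1) :: pvRuns (cs.dropWhile (· == c))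
termination_by l => l.length
decreasing_by
  simp only [List.length_cons]
  exact Nat.lt_succ_of_le (List.length_dropWhile_le _ _)

def character_frequency_encoding_alt (word : String) : List Int :=
  let shifted : List Char :=
    PySem.List.sorted
      (word.toList.map (fun letter => if letter = 'z' then 'a' else Char.ofNat (letter.toNat + 1)))
      (fun x => x) false
  let products : List Int :=
    (pvRuns shifted).map (fun p => (p.1.toNat : Int) * (p.2 : Int))
  PySem.List.sorted products (fun x => x) true

-- ===== PRECONDITION & SPEC =====
def Spec_character_frequency_encoding (word : String) (out : List Int) : Prop := out = character_frequency_encoding_alt word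
instance (word : String) (out : List Int) : Decidable (Spec_character_frequency_encoding word out) := by unfold Spec_character_frequency_encoding; infer_instance

-- ===== CLAIM (what is proved, stated in full; the proofs are below) =====
def Claim_equal_character_frequency_encoding : Prop := ∀ (word : String), Dom_character_frequency_encoding word → Spec_character_frequency_encoding word (character_frequency_encoding word)

-- ===== LEMMAS AND PROOFS =====

lemma pvCount_loop_eq_counter (ns : List Char) :
    ns.foldl
      (fun d letter =>
        if d.contains letter then d.insert letter (d.getD letter 0 + 1)
        else d.insert letter 1)
      PySem.Dict.empty = PySem.Dict.counter ns := by
  rw [← PySem.Dict.foldl_insert_getD_add_one_eq_counter]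
  apply PySem.List.foldl_congr_mem
  intro d x _
  by_cases h : d.contains x = true
  · simp [h]
  · have h' : d.contains x = false := by simpa using h
    simp [h', PySem.Dict.getD_of_not_contains d 0 h']

lemma pvRuns_spec (l : List Char) (h : l.Pairwise (· ≤ ·)) :
    (∀ p ∈ pvRuns l, p.2 = l.count p.1) ∧
    ((pvRuns l).map Prod.fst).Nodup ∧
    (∀ c, c ∈ (pvRuns l).map Prod.fst ↔ c ∈ l) := by
  induction l using pvRuns.induct with
  | case1 => simp [pvRuns]
  | case2 c cs ih =>
    have hcle : ∀ x ∈ cs, c ≤ x := (List.pairwise_cons.mp h).1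
    have hcs : cs.Pairwise (· ≤ ·) := (List.pairwise_cons.mp h).2
    have hsplit : cs.takeWhile (· == c) ++ cs.dropWhile (· == c) = cs :=
      List.takeWhile_append_dropWhile
    have htc : ∀ x ∈ cs.takeWhile (· == c), x = c := fun x hx => by
      simpa using List.mem_takeWhile_imp hx
    have hdp : (cs.dropWhile (· == c)).Pairwise (· ≤ ·) :=
      List.Pairwise.sublist (List.dropWhile_sublist _) hcs
    have hdsub : ∀ x ∈ cs.dropWhile (· == c), x ∈ cs := fun x hx =>
      (List.dropWhile_sublist _).mem hx
    have hlt : ∀ x ∈ cs.dropWhile (· == c), c < x := by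
      intro x hx
      cases hd' : cs.dropWhile (· == c) with
      | nil => rw [hd'] at hx; simp at hx
      | cons y ys =>
        have hy : (y == c) = false := by
          have := List.head?_dropWhile_not (· == c) cs
          rw [hd'] at this; simpa using this
        have hcy : c < y :=
          lt_of_le_of_ne (hcle y (hdsub y (by rw [hd']; simp)))
            (fun hcy => by simp [hcy.symm] at hy)
        rw [hd'] at hx
        rcases List.mem_cons.mp hx with rfl | hx'
        · exact hcy
        · exact lt_of_lt_of_le hcy ((List.pairwise_cons.mp (hd' ▸ hdp)).1 x hx')
    have hcd : c ∉ cs.dropWhile (· == c) := fun hm => lt_irrefl c (hlt c hm)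
    have hcountt : (cs.takeWhile (· == c)).count c = (cs.takeWhile (· == c)).length :=
      List.count_eq_length.mpr (fun b hb => (htc b hb).symm)
    obtain ⟨ih1, ih2, ih3⟩ := ih hdp
    refine ⟨?_, ?_, ?_⟩
    · intro p hp
      rw [pvRuns] at hp
      rcases List.mem_cons.mp hp with rfl | hp'
      · have hccs : List.count c cs = (cs.takeWhile (· == c)).length := by
          conv_lhs => rw [← hsplit]
          rw [List.count_append, hcountt, List.count_eq_zero.mpr hcd, Nat.add_zero]
        rw [List.count_cons_self, hccs]
      · have hp1d : p.1 ∈ cs.dropWhile (· == c) :=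
          (ih3 p.1).mp (List.mem_map_of_mem hp')
        have hne : p.1 ≠ c := fun he => lt_irrefl c (he ▸ hlt p.1 hp1d)
        have ht0 : (cs.takeWhile (· == c)).count p.1 = 0 :=
          List.count_eq_zero.mpr (fun hm => hne (htc _ hm))
        have hne' : ¬ (c = p.1) := fun e => hne e.symm
        have hcnt2 : List.count p.1 cs = List.count p.1 (cs.dropWhile (· == c)) := by
          conv_lhs => rw [← hsplit]
          rw [List.count_append, ht0, Nat.zero_add]
        rw [ih1 p hp']
        simp [hne', hcnt2]
    · rw [pvRuns]
      simp only [List.map_cons, List.nodup_cons]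
      exact ⟨fun hm => hcd ((ih3 c).mp hm), ih2⟩
    · intro c'
      rw [pvRuns]
      simp only [List.map_cons, List.mem_cons, ih3]
      constructor
      · rintro (rfl | hm)
        · exact Or.inl rfl
        · exact Or.inr (hdsub _ hm)
      · rintro (rfl | hm')
        · exact Or.inl rfl
        · rw [← hsplit] at hm'
          rcases List.mem_append.mp hm' with h1 | h2
          · exact Or.inl (htc _ h1)
          · exact Or.inr h2

-- ===== VERDICT (by name: the statement is the Claim_ definition above) =====
theorem character_frequency_encoding_spec : Claim_equal_character_frequency_encoding := by
  intro word _
  unfold Spec_character_frequency_encoding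
  simp only [character_frequency_encoding, character_frequency_encoding_alt]
  rw [PySem.List.foldl_append_singleton_eq_map, List.nil_append]
  have hshift : (word.toList.map (fun letter => if letter = 'z' then 'a' else Char.ofNat (letter.toNat + 1)))
      = word.toList.map pvShift := by
    simp [pvShift]
  rw [hshift]
  set ns := word.toList.map pvShift with hns
  set g : Char → Int := fun k => (k.toNat : Int) * ((List.count k ns : Nat) : Int) with hg
  -- A side: combined_values = (Set.ofList ns).map g
  rw [pvCount_loop_eq_counter, PySem.List.foldl_append_singleton_eq_map, List.nil_append,
    PySem.Dict.items_counter, List.map_map]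
  -- B side
  set m := PySem.List.sorted ns (fun x => x) false with hm
  have hmp : m.Pairwise (· ≤ ·) := PySem.List.sorted_pairwise ns (fun x => x)
  obtain ⟨h1, h2, h3⟩ := pvRuns_spec m hmp
  have hmperm : m.Perm ns := PySem.List.sorted_perm ns (fun x => x) false
  have hB : (pvRuns m).map (fun p => (p.1.toNat : Int) * (p.2 : Int))
      = ((pvRuns m).map Prod.fst).map g := by
    rw [List.map_map]
    apply List.map_congr_left
    intro p hp
    simp only [Function.comp, hg]
    rw [h1 p hp, hmperm.count_eq]
  rw [hB]
  have hA : ((fun p : Char × Int => (p.1.toNat : Int) * p.2) ∘ fun k : Char => (k, (List.count k ns : Int))) = g := by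
    funext k; simp [hg]
  rw [show List.map pvShift word.toList = ns from rfl, hA]
  have hkeys : (List.map Prod.fst (pvRuns m)).Perm (PySem.Set.ofList ns) := by
    rw [List.perm_ext_iff_of_nodup h2 (PySem.Set.nodup_ofList ns)]
    intro a
    rw [h3, PySem.Set.mem_ofList, hmperm.mem_iff]
  apply PySem.List.eq_of_perm_of_pairwise_le_of_injective (fun x : Int => -x) neg_injective
  · exact (PySem.List.sorted_perm _ _ _).trans
      (((hkeys.map g).symm).trans (PySem.List.sorted_perm _ _ _).symm)
  · exact (PySem.List.sorted_pairwise_rev _ _).imp (fun h => neg_le_neg h)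
  · exact (PySem.List.sorted_pairwise_rev _ _).imp (fun h => neg_le_neg h)
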